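-- pv_equiv track=rewrite | github.com/Krukowilk/Reddit-programmer-challenges | #381.py | yahtzee
-- ===== SOURCE A (Python) =====
-- def yahtzee(dice):
--     val = {}
--     max_val = 0
--
--     for i in dice:
--         if i not in val:
--             val.update({i:i})
--             if i > max_val:
--                 max_val = i
--         else:
--             New_val = val[i] + i
--             val.update({i:New_val})
--             if val[i] > max_val:
--                 max_val = val[i]
--     return(max_val)
-- ===== SOURCE B (Python) =====
-- def yahtzee(dice):
--     return max([v * dice.count(v) for v in set(dice)] + [0])
-- ===== Notes on version B (the rewrite author's own statement) =====
-- stated objective: idiomatic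
-- what changed: Replaces the stateful single pass with a dict of running sums and a running max by a one-line distinct-values scan: max of v*dice.count(v) over set(dice), with 0 among the candidates.
import Mathlib
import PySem

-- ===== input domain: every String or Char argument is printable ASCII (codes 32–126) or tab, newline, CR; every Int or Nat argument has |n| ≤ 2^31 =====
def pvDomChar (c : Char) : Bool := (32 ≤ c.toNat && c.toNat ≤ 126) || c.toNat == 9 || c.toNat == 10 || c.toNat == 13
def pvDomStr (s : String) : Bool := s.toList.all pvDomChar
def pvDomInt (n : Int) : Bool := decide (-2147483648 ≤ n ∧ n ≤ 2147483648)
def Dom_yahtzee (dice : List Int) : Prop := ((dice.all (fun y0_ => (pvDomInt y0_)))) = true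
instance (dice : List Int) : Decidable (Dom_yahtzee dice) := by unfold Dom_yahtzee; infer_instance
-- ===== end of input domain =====

-- B replaces A's single pass over a dict of running sums and a running max by the idiomatic
-- one-liner max([v * dice.count(v) for v in set(dice)] + [0]); same values, no speed claim.

-- ===== PORT A =====
-- one loop iteration of A: dict of running per-value sums, running max
def yahtzeeStep (s : PySem.Dict Int Int × Int) (i : Int) : PySem.Dict Int Int × Int :=
  match s.1.get? i with
  | none => (s.1.insert i i, if i > s.2 then i else s.2)
  | some x =>
      let newVal := x + i
      let val' := s.1.insert i newVal
      let cur := val'.getD i 0      -- val[i] looked up after the update, as in A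
      (val', if cur > s.2 then cur else s.2)

def yahtzee (dice : List Int) : Int :=
  (dice.foldl yahtzeeStep (PySem.Dict.empty, 0)).2

-- ===== PORT B =====
def yahtzee_alt (dice : List Int) : Int :=
  let cands := ((PySem.Set.ofList dice).map (fun v => v * (PySem.List.count dice v : Int))) ++ [0]
  ((PySem.List.max? cands (fun y => y)).getD 0)

-- ===== PRECONDITION & SPEC =====
def Spec_yahtzee (dice : List Int) (out : Int) : Prop := out = yahtzee_alt dice
instance (dice : List Int) (out : Int) : Decidable (Spec_yahtzee dice out) := by unfold Spec_yahtzee; infer_instance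

-- ===== CLAIM (what is proved, stated in full; the proofs are below) =====
def Claim_equal_yahtzee : Prop := ∀ (dice : List Int), Dom_yahtzee dice → Spec_yahtzee dice (yahtzee dice)

-- ===== LEMMAS AND PROOFS =====

-- the final per-value total, and the max-with-0 over all distinct values
def pvF (l : List Int) (v : Int) : Int := v * (l.count v : Int)
def pvM (l : List Int) : Int := ((PySem.Set.ofList l).map (pvF l)).foldl max 0

lemma pv_foldl_max_pull (l : List Int) : ∀ (a b : Int), l.foldl max (max a b) = max a (l.foldl max b) := by
  induction l with
  | nil => intro a b; rfl
  | cons c t ih =>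
      intro a b
      simp only [List.foldl_cons, max_assoc]
      exact ih a (max b c)

-- replacing one value f i of a nodup list by f' i, with max 0 (f i) ≤ max 0 (f' i)
lemma pv_bump (s : List Int) (hnd : s.Nodup) (i : Int) (hi : i ∈ s) (f f' : Int → Int)
    (hagree : ∀ v ∈ s, v ≠ i → f' v = f v) (hle : f i ≤ max 0 (f' i)) :
    (s.map f').foldl max 0 = max ((s.map f).foldl max 0) (f' i) := by
  have perm := List.perm_cons_erase hi
  have hmapcongr : (s.erase i).map f' = (s.erase i).map f := by
    apply List.map_congr_left
    intro v hv
    exact hagree v (List.mem_of_mem_erase hv)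
      (fun h => hnd.not_mem_erase (h ▸ hv))
  have h1 : (s.map f').foldl max 0 = max (f' i) (((s.erase i).map f).foldl max 0) := by
    rw [List.Perm.foldl_op_eq (perm.map f')]
    simp only [List.map_cons, List.foldl_cons, hmapcongr]
    rw [max_comm 0 (f' i), pv_foldl_max_pull]
  have h2 : (s.map f).foldl max 0 = max (f i) (((s.erase i).map f).foldl max 0) := by
    rw [List.Perm.foldl_op_eq (perm.map f)]
    simp only [List.map_cons, List.foldl_cons]
    rw [max_comm 0 (f i), pv_foldl_max_pull]
  have hR : 0 ≤ ((s.erase i).map f).foldl max 0 := (PySem.List.le_foldl_max _ 0).1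
  rw [h1, h2]
  omega

lemma pv_loop_inv (l : List Int) :
    (∀ v : Int, (l.foldl yahtzeeStep (PySem.Dict.empty, 0)).1.get? v
        = if v ∈ l then some (pvF l v) else none)
    ∧ (l.foldl yahtzeeStep (PySem.Dict.empty, 0)).2 = pvM l := by
  induction l using List.reverseRecOn with
  | nil =>
      constructor
      · intro v; simp [PySem.Dict.get?, PySem.Dict.empty]
      · simp [pvM, PySem.Set.ofList]
  | append_singleton l i ih =>
      obtain ⟨hd, hm⟩ := ih
      rw [List.foldl_append]
      set s := l.foldl yahtzeeStep (PySem.Dict.empty, 0) with hs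
      have hofl : PySem.Set.ofList (l ++ [i]) = PySem.Set.add (PySem.Set.ofList l) i := by
        simp [PySem.Set.ofList_eq_foldl, List.foldl_append]
      by_cases hi : i ∈ l
      · -- i already seen: dict update branch
        have hstep : List.foldl yahtzeeStep s [i]
            = (s.1.insert i (pvF l i + i),
               if (s.1.insert i (pvF l i + i)).getD i 0 > s.2
               then (s.1.insert i (pvF l i + i)).getD i 0 else s.2) := by
          simp [yahtzeeStep, hd i, hi]
        have hgetD : (s.1.insert i (pvF l i + i)).getD i 0 = pvF l i + i := by
          simp [PySem.Dict.getD, PySem.Dict.get?_insert_self]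
        have hnewF : pvF (l ++ [i]) i = pvF l i + i := by
          simp [pvF, List.count_append]
          ring
        have hoth : ∀ v : Int, v ≠ i → pvF (l ++ [i]) v = pvF l v := by
          intro v hv
          simp [pvF, List.count_append, hv.symm]
        have hset : PySem.Set.ofList (l ++ [i]) = PySem.Set.ofList l := by
          rw [hofl]
          simp [PySem.Set.add, PySem.Set.contains, PySem.Set.mem_ofList, hi]
        constructor
        · intro v
          rw [hstep]
          by_cases hv : v = i
          · subst hv
            simp [PySem.Dict.get?_insert_self, hnewF, hi]
          · rw [PySem.Dict.get?_insert_of_ne _ _ hv, hd v]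
            simp [hoth v hv, hv]
        · rw [hstep]
          simp only [hgetD]
          have hbump : ((PySem.Set.ofList l).map (pvF (l ++ [i]))).foldl max 0
              = max (((PySem.Set.ofList l).map (pvF l)).foldl max 0) (pvF (l ++ [i]) i) := by
            apply pv_bump _ (PySem.Set.nodup_ofList l) i ((PySem.Set.mem_ofList l i).mpr hi)
            · intro v _ hv; exact hoth v hv
            · rw [hnewF]
              by_cases h0 : 0 ≤ i
              · have : pvF l i ≤ pvF l i + i := by omega
                exact le_max_of_le_right this
              · have : pvF l i ≤ 0 := by
                  have hc : (0:Int) ≤ (l.count i : Int) := by positivity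
                  exact mul_nonpos_of_nonpos_of_nonneg (by omega) hc
                exact le_max_of_le_left this
          rw [pvM, hset, hbump, ← pvM, ← hm, hnewF]
          omega
      · -- first occurrence of i
        have hstep : List.foldl yahtzeeStep s [i]
            = (s.1.insert i i, if i > s.2 then i else s.2) := by
          simp [yahtzeeStep, hd i, hi]
        have hcnt : l.count i = 0 := List.count_eq_zero.mpr hi
        have hnewF : pvF (l ++ [i]) i = i := by
          simp [pvF, List.count_append, hcnt]
        have hoth : ∀ v : Int, v ≠ i → pvF (l ++ [i]) v = pvF l v := by
          intro v hv
          simp [pvF, List.count_append, hv.symm]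
        have hset : PySem.Set.ofList (l ++ [i]) = PySem.Set.ofList l ++ [i] := by
          rw [hofl]
          simp [PySem.Set.add, PySem.Set.contains, PySem.Set.mem_ofList, hi]
        constructor
        · intro v
          rw [hstep]
          by_cases hv : v = i
          · subst hv
            simp [PySem.Dict.get?_insert_self, hnewF]
          · rw [PySem.Dict.get?_insert_of_ne _ _ hv, hd v]
            simp [hoth v hv, hv]
        · rw [hstep]
          have hmap : (PySem.Set.ofList (l ++ [i])).map (pvF (l ++ [i]))
              = (PySem.Set.ofList l).map (pvF l) ++ [i] := by
            rw [hset, List.map_append, List.map_singleton, hnewF]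
            congr 1
            apply List.map_congr_left
            intro v hv
            exact hoth v (fun h => hi (h ▸ (PySem.Set.mem_ofList l v).mp hv))
          simp only [pvM, hmap, List.foldl_append, List.foldl_cons, List.foldl_nil]
          rw [← pvM, ← hm]
          omega

lemma pv_alt_eq (l : List Int) : yahtzee_alt l = pvM l := by
  have hfun : (fun v => v * (PySem.List.count l v : Int)) = pvF l := by
    funext v
    simp [pvF, PySem.List.count_eq]
  unfold yahtzee_alt
  rw [hfun]
  cases h : (PySem.Set.ofList l).map (pvF l) with
  | nil => simp [pvM, h, PySem.List.max?_id_cons]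
  | cons m t =>
      simp only [pvM, h, List.cons_append, PySem.List.max?_id_cons, Option.getD_some,
        List.foldl_append, List.foldl_cons, List.foldl_nil]
      rw [pv_foldl_max_pull t 0 m]
      exact max_comm _ _

-- ===== VERDICT (by name: the statement is the Claim_ definition above) =====
theorem yahtzee_spec : Claim_equal_yahtzee := by
  intro dice _
  unfold Spec_yahtzee
  rw [pv_alt_eq]
  unfold yahtzee
  exact (pv_loop_inv dice).2
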